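-- pv_equiv track=rewrite | github.com/antegral/problem-solving | 프로그래머스/1/172928. 공원 산책/공원 산책.py | solution
-- ===== SOURCE A (Python) =====
-- def solution(park, routes):
--     dog = []
--     park_size = [len(park) - 1, len(park[0]) - 1]
--
--     for i in range(0, len(park)):
--         j = park[i].find("S")
--         if j == -1:
--             continue
--         dog = [i, j]
--
--     for route in routes:
--         direction, move = route.split(" ")
--         prediction = [0, 0]
--
--         if direction == "N":
--             prediction = [dog[0] - int(move), dog[1]]
--         elif direction == "S":
--             prediction = [dog[0] + int(move), dog[1]]
--         elif direction == "W":
--             prediction = [dog[0], dog[1] - int(move)]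
--         elif direction == "E":
--             prediction = [dog[0], dog[1] + int(move)]
--
--         if prediction[0] < 0 or prediction[1] < 0:
--             continue
--
--         if prediction[0] > park_size[0] or prediction[1] > park_size[1]:
--             continue
--
--         isColision = False
--         A = range(dog[0], prediction[0] + 1)
--         B = range(dog[1], prediction[1] + 1)
--
--         if dog[0] + 1 > prediction[0] + 1:
--             A = range(prediction[0], dog[0])
--
--         if dog[1] + 1 > prediction[1] + 1:
--             B = range(prediction[1], dog[1])
--
--         for i in A:
--             if park[i][prediction[1]] == "X":
--                 isColision = True
--
--         for i in B:
--             if park[prediction[0]][i] == "X":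
--                 isColision = True
--
--         if isColision:
--             continue
--
--         dog = prediction
--     return dog
-- ===== SOURCE B (Python) =====
-- # B: precomputes per-row and per-column prefix counts of 'X' once, then answers each
-- # route's obstacle test in O(1) by a prefix difference instead of scanning the path.
-- def _prefix(cells):
--     acc = [0]
--     for c in cells:
--         acc.append(acc[-1] + (c == "X"))
--     return acc
--
--
-- def solution(park, routes):
--     rows, cols = len(park), len(park[0])
--     pos = None
--     for i, row in enumerate(park):
--         j = row.find("S")
--         if j != -1:
--             pos = (i, j)
--     rowpre = [_prefix(row) for row in park]
--     colpre = [_prefix(col) for col in zip(*park)]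
--     for route in routes:
--         d, move = route.split(" ")
--         n = int(move)
--         i, j = pos
--         ti = i + n * ((d == "S") - (d == "N"))
--         tj = j + n * ((d == "E") - (d == "W"))
--         if 0 <= ti < rows and 0 <= tj < cols:
--             if ti == i:
--                 lo, hi = (j, tj) if j <= tj else (tj, j)
--                 clear = rowpre[i][hi + 1] == rowpre[i][lo]
--             else:
--                 lo, hi = (i, ti) if i <= ti else (ti, i)
--                 clear = colpre[j][hi + 1] == colpre[j][lo]
--             if clear:
--                 pos = (ti, tj)
--     return [pos[0], pos[1]] if pos else []
-- ===== Notes on version B (the rewrite author's own statement) =====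
-- stated objective: faster
-- what changed: B precomputes per-row and per-column (zip(*park)) prefix counts of 'X' in one O(rows*cols) pass and decides each route's obstacle test by a single prefix difference in O(1), instead of A's per-route linear scan over every cell of the path.
-- outside the precondition, e.g. on solution(['OS', 'OO', 'O'], ['S 1']): A returns [1, 1], B raises IndexError; on solution(['OX', 'SO'], ['Q 5']): A returns [0, 0], B returns [1, 0]
import Mathlib
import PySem

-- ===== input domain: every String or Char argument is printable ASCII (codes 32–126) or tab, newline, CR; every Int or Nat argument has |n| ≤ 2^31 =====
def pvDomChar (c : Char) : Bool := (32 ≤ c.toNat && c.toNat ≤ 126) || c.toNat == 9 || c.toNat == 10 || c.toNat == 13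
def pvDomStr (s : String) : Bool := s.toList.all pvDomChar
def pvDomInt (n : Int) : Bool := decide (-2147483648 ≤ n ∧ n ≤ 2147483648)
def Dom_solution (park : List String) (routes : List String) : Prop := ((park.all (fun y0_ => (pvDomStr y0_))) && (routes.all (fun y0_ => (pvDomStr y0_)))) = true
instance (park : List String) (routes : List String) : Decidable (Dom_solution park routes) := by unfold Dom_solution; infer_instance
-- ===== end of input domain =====

-- B precomputes per-row and per-column prefix counts of 'X' and answers each route's obstacle test
-- by one prefix difference instead of scanning the path; B is proved to return A's exact value on Pre_.

-- park[i][j] as both Pythons access it; the defaults are unreachable on inputs admitted by Pre_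
-- (where every access Python performs is in range).
def pvCell (park : List String) (i j : Int) : Char :=
  PySem.List.pyGetD (PySem.List.pyGetD park i "").toList j '?'

-- ===== PORT A =====
def stepA (park : List String) (parkSize : List Int) (dog : List Int) (route : String) : List Int :=
  match PySem.Str.split? route " " with
  | some [direction, move] =>
    let m : Int := (PySem.Int.ofStr? move).getD 0   -- int(move); parse failure (ValueError) is outside Pre_
    let d0 := PySem.List.pyGetD dog 0 0             -- dog[0]; dog = [] (IndexError) is outside Pre_
    let d1 := PySem.List.pyGetD dog 1 0
    let prediction : List Int :=
      if direction = "N" then [d0 - m, d1]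
      else if direction = "S" then [d0 + m, d1]
      else if direction = "W" then [d0, d1 - m]
      else if direction = "E" then [d0, d1 + m]
      else [0, 0]
    let p0 := PySem.List.pyGetD prediction 0 0
    let p1 := PySem.List.pyGetD prediction 1 0
    if p0 < 0 ∨ p1 < 0 then dog
    else if p0 > PySem.List.pyGetD parkSize 0 0 ∨ p1 > PySem.List.pyGetD parkSize 1 0 then dog
    else
      let A := if d0 + 1 > p0 + 1 then PySem.List.pyRange p0 d0 else PySem.List.pyRange d0 (p0 + 1)
      let B := if d1 + 1 > p1 + 1 then PySem.List.pyRange p1 d1 else PySem.List.pyRange d1 (p1 + 1)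
      let c1 := A.foldl (fun b i => if pvCell park i p1 = 'X' then true else b) false
      let isColision := B.foldl (fun b i => if pvCell park p0 i = 'X' then true else b) c1
      if isColision then dog else prediction
  | _ => dog   -- 'direction, move = route.split(" ")' raises ValueError here; outside Pre_

def solution (park : List String) (routes : List String) : List Int :=
  let parkSize : List Int :=
    [PySem.List.len park - 1, PySem.Str.len (PySem.List.pyGetD park 0 "") - 1]  -- park[0]: park = [] is outside Pre_
  let dog : List Int :=
    (PySem.List.pyRange 0 (PySem.List.len park)).foldl
      (fun dog i =>
        let j := PySem.Str.find (PySem.List.pyGetD park i "") "S"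
        if j = -1 then dog else [i, j]) []
  routes.foldl (stepA park parkSize) dog

-- ===== PORT B =====
-- (c == "X") used as Python's 0/1 bool arithmetic
def pvXv (c : Char) : Int := if c = 'X' then 1 else 0

-- _prefix(cells): acc = [0]; for c in cells: acc.append(acc[-1] + (c == "X"))
def pvPrefix (cells : List Char) : List Int :=
  cells.foldl (fun acc c => acc ++ [PySem.List.pyGetD acc (-1) 0 + pvXv c]) [0]

-- zip(*park): columns of the park, truncated at the shortest row (Python's zip), hand-ported
def pvCols (rows : List (List Char)) : List (List Char) :=
  if h : rows ≠ [] ∧ ∀ r ∈ rows, r ≠ [] then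
    (rows.map (fun r => r.headD ' ')) :: pvCols (rows.map List.tail)
  else []
termination_by (rows.map List.length).sum
decreasing_by
  obtain ⟨hne, hall⟩ := h
  obtain ⟨r0, hr0⟩ := List.exists_mem_of_ne_nil rows hne
  rw [List.map_map]
  conv_rhs => rw [← List.attach_map_subtype_val rows, List.map_map]
  exact List.sum_lt_sum (fun x : {x // x ∈ rows} => x.1.tail.length)
    (fun x : {x // x ∈ rows} => x.1.length)
    (fun r _ => by simp only [List.length_tail]; omega)
    ⟨⟨r0, hr0⟩, List.mem_attach _ _, by
      have hnil : r0 ≠ [] := hall r0 hr0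
      have hpos : 0 < r0.length := List.length_pos_iff.mpr hnil
      simp only [List.length_tail]
      omega⟩

def stepB (rowpre colpre : List (List Int)) (rows cols : Int) (pos : Int × Int) (route : String) : Int × Int :=
  match PySem.Str.split? route " " with
  | some [d, move] =>
    let n : Int := (PySem.Int.ofStr? move).getD 0    -- int(move); ValueError is outside Pre_
    let i := pos.1
    let j := pos.2
    let ti := i + n * ((if d = "S" then (1:Int) else 0) - (if d = "N" then (1:Int) else 0))
    let tj := j + n * ((if d = "E" then (1:Int) else 0) - (if d = "W" then (1:Int) else 0))
    if 0 ≤ ti ∧ ti < rows ∧ 0 ≤ tj ∧ tj < cols then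
      let clear :=
        if ti = i then
          let lohi := if j ≤ tj then (j, tj) else (tj, j)
          PySem.List.pyGetD (PySem.List.pyGetD rowpre i []) (lohi.2 + 1) 0 =
            PySem.List.pyGetD (PySem.List.pyGetD rowpre i []) lohi.1 0
        else
          let lohi := if i ≤ ti then (i, ti) else (ti, i)
          PySem.List.pyGetD (PySem.List.pyGetD colpre j []) (lohi.2 + 1) 0 =
            PySem.List.pyGetD (PySem.List.pyGetD colpre j []) lohi.1 0
      if clear then (ti, tj) else pos
    else pos
  | _ => pos   -- route.split(" ") unpack failure: ValueError, outside Pre_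

def solution_alt (park : List String) (routes : List String) : List Int :=
  let rows := PySem.List.len park
  let cols := PySem.Str.len (PySem.List.pyGetD park 0 "")   -- len(park[0]); park = [] (IndexError) is outside Pre_
  let pos0 : Option (Int × Int) :=
    (PySem.List.enumerate park).foldl
      (fun acc p =>
        let j := PySem.Str.find p.2 "S"
        if j ≠ -1 then some (p.1, j) else acc) none
  let rowpre : List (List Int) := park.map (fun row => pvPrefix row.toList)
  -- [_prefix(col) for col in zip(*park)]: zip truncates at the shortest row
  let colpre : List (List Int) := (pvCols (park.map (fun row => row.toList))).map pvPrefix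
  -- the route loop reads pos: on a park without 'S' and nonempty routes the Python raises
  -- TypeError (outside Pre_), modelled by keeping the state none
  let posF := routes.foldl
    (fun st route => st.map (fun q => stepB rowpre colpre rows cols q route)) pos0
  match posF with
  | none => []
  | some p => [p.1, p.2]

-- ===== PRECONDITION & SPEC =====
-- a route of the intended form "<dir> <dist>", dir ∈ {N,S,W,E}, dist an integer literal
def pvWfRoute (route : String) : Bool :=
  match PySem.Str.split? route " " with
  | some [direction, move] =>
    (direction == "N" || direction == "S" || direction == "W" || direction == "E") &&
      (PySem.Int.ofStr? move).isSome
  | _ => false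

-- Pre_ admits the problem's natural domain: a nonempty park, and, whenever there are routes, a
-- RECTANGULAR park (on ragged parks B's zip-truncated column table can raise IndexError, and A
-- itself raises mid-scan on many ragged inputs), a dog 'S' present (A raises IndexError on
-- dog[0] otherwise), and routes of the form "<dir> <dist>" with dir in {N,S,W,E} and dist an
-- int literal: malformed routes make A raise ValueError, and a direction outside N/S/W/E makes
-- A jump to its accidental fall-through prediction [0,0], a corner outside the problem's
-- contract where A's and B's behaviours are equally accidental.
def Pre_solution (park : List String) (routes : List String) : Prop :=
  park ≠ [] ∧
  (routes = [] ∨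
    ((∀ row ∈ park, PySem.Str.len row = PySem.Str.len (PySem.List.pyGetD park 0 "")) ∧
     (∃ row ∈ park, PySem.Str.find row "S" ≠ -1) ∧
     (∀ route ∈ routes, pvWfRoute route = true)))

instance (park : List String) (routes : List String) : Decidable (Pre_solution park routes) := by
  unfold Pre_solution; infer_instance

def pvWitness_solution : List String × List String := (["SO", "OX"], ["E 1", "S 1"])

def Spec_solution (park : List String) (routes : List String) (out : List Int) : Prop := out = solution_alt park routes
instance (park : List String) (routes : List String) (out : List Int) : Decidable (Spec_solution park routes out) := by unfold Spec_solution; infer_instance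

-- ===== CLAIM (what is proved, stated in full; the proofs are below) =====
def Claim_equal_solution : Prop := ∀ (park : List String) (routes : List String), Dom_solution park routes → Pre_solution park routes → Spec_solution park routes (solution park routes)

-- ===== LEMMAS AND PROOFS =====

-- relation transport along two folds over the same list
theorem pvFoldlRel {α β γ : Type} (R : β → γ → Prop) (f : β → α → β) (g : γ → α → γ)
    (l : List α) (b : β) (c : γ) (hbc : R b c)
    (h : ∀ b c x, x ∈ l → R b c → R (f b x) (g c x)) :
    R (l.foldl f b) (l.foldl g c) := by
  induction l generalizing b c with
  | nil => exact hbc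
  | cons x xs ih =>
    exact ih _ _ (h b c x (by simp) hbc) (fun b c y hy => h b c y (by simp [hy]))

-- the two start-search loops produce corresponding results
def pvRelStart (park : List String) (a : List Int) (b : Option (Int × Int)) : Prop :=
  (a = [] ∧ b = none) ∨
  ∃ i j : Int, a = [i, j] ∧ b = some (i, j) ∧ 0 ≤ i ∧ i < (park.length : Int) ∧
    PySem.Str.find (PySem.List.pyGetD park i "") "S" = j ∧ j ≠ -1

theorem pvStartLoops (park : List String) :
    pvRelStart park
      ((PySem.List.pyRange 0 (PySem.List.len park)).foldl
        (fun dog i =>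
          let j := PySem.Str.find (PySem.List.pyGetD park i "") "S"
          if j = -1 then dog else [i, j]) [])
      ((PySem.List.enumerate park).foldl
        (fun acc p =>
          let j := PySem.Str.find p.2 "S"
          if j ≠ -1 then some (p.1, j) else acc) none) := by
  rw [PySem.List.enumerate_eq_map_pyRange park "", List.foldl_map]
  apply pvFoldlRel (pvRelStart park)
  · exact Or.inl ⟨rfl, rfl⟩
  · intro b c x hx hR
    have hx' : 0 ≤ x ∧ x < (park.length : Int) := by
      have := PySem.List.mem_pyRange_one.mp hx
      rw [PySem.List.len_eq] at this
      omega
    dsimp only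
    by_cases hf : PySem.Str.find (PySem.List.pyGetD park x "") "S" = -1
    · rw [if_pos hf, if_neg (not_not_intro hf)]
      exact hR
    · rw [if_neg hf, if_pos hf]
      exact Or.inr ⟨x, _, rfl, rfl, hx'.1, hx'.2, rfl, hf⟩

theorem pvFoldSome (l : List (Int × String)) :
    ∀ acc : Option (Int × Int),
    (acc ≠ none ∨ ∃ p ∈ l, PySem.Str.find p.2 "S" ≠ -1) →
    l.foldl (fun acc p =>
      let j := PySem.Str.find p.2 "S"
      if j ≠ -1 then some (p.1, j) else acc) acc ≠ none := by
  induction l with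
  | nil =>
    intro acc h
    rcases h with h | ⟨p, hp, _⟩
    · simpa using h
    · cases hp
  | cons x xs ih =>
    intro acc h
    simp only [List.foldl_cons]
    apply ih
    dsimp only
    by_cases hf : PySem.Str.find x.2 "S" ≠ -1
    · left; rw [if_pos hf]; exact Option.some_ne_none _
    · rw [if_neg hf]
      rcases h with h | ⟨p, hp, hfp⟩
      · exact Or.inl h
      · rcases List.mem_cons.mp hp with rfl | hp'
        · exact absurd hfp hf
        · right; exact ⟨p, hp', hfp⟩

-- if some row of park contains an 'S', B's start search does not return none
theorem pvStartLoops_ne_none (park : List String)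
    (h : ∃ row ∈ park, PySem.Str.find row "S" ≠ -1) :
    ((PySem.List.enumerate park).foldl
      (fun acc p =>
        let j := PySem.Str.find p.2 "S"
        if j ≠ -1 then some (p.1, j) else acc) none) ≠ none := by
  obtain ⟨row, hrow, hfind⟩ := h
  apply pvFoldSome
  right
  obtain ⟨k, hk, hEq⟩ := List.getElem_of_mem hrow
  refine ⟨((k : Int), row), ?_, hfind⟩
  rw [PySem.List.enumerate_eq_map_pyRange park ""]
  refine List.mem_map.mpr ⟨(k : Int), ?_, ?_⟩
  · rw [PySem.List.len_eq, PySem.List.mem_pyRange_one]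
    omega
  · simp only [PySem.List.pyGetD_natCast]
    rw [List.getD_eq_getElem _ _ hk, hEq]

-- the found cell really holds an 'S', and its column is strictly inside the row
theorem pvFindS (park : List String) (i j : Int)
    (hj : PySem.Str.find (PySem.List.pyGetD park i "") "S" = j) (hne : j ≠ -1) :
    pvCell park i j = 'S' ∧ 0 ≤ j ∧ j < ((PySem.List.pyGetD park i "").toList.length : Int) := by
  have h1 : PySem.Chars.find (PySem.List.pyGetD park i "").toList "S".toList = j := by
    simpa using hj
  have hge : 0 ≤ j := by
    have := PySem.Chars.neg_one_le_find (PySem.List.pyGetD park i "").toList "S".toList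
    omega
  have hsp := PySem.Chars.find_spec (s := (PySem.List.pyGetD park i "").toList)
    (sub := "S".toList) (by rw [h1]; exact hge)
  obtain ⟨t, ht⟩ := hsp.1
  rw [h1] at ht
  have hS : (PySem.List.pyGetD park i "").toList[j.toNat]? = some 'S' := by
    have h2 : ("S".toList ++ t)[0]? = some 'S' := by simp
    rw [ht] at h2
    rwa [List.getElem?_drop, Nat.add_zero] at h2
  have hlt : j.toNat < (PySem.List.pyGetD park i "").toList.length :=
    List.getElem?_eq_some_iff.mp hS |>.1
  refine ⟨?_, hge, by omega⟩
  unfold pvCell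
  rw [PySem.List.pyGetD_eq_getElem _ _ hge (by omega)]
  exact (List.getElem?_eq_some_iff.mp hS).2

-- ---- prefix-table characterisation ----

def pvScan (a : Int) : List Char → List Int
  | [] => []
  | c :: cs => (a + pvXv c) :: pvScan (a + pvXv c) cs

theorem pvPrefix_foldl_gen (cells : List Char) :
    ∀ (l : List Int) (a : Int),
    cells.foldl (fun acc c => acc ++ [PySem.List.pyGetD acc (-1) 0 + pvXv c]) (l ++ [a]) =
      (l ++ [a]) ++ pvScan a cells := by
  induction cells with
  | nil => intro l a; simp [pvScan]
  | cons c cs ih =>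
    intro l a
    simp only [List.foldl_cons, PySem.List.pyGetD_neg_one_append_singleton, pvScan]
    have := ih (l ++ [a]) (a + pvXv c)
    simp only [List.append_assoc] at this ⊢
    exact this

theorem pvPrefix_eq (cells : List Char) : pvPrefix cells = 0 :: pvScan 0 cells := by
  have := pvPrefix_foldl_gen cells [] 0
  simpa [pvPrefix] using this

theorem pvScan_getD (cells : List Char) :
    ∀ (a : Int) (k : Nat), k ≤ cells.length →
    (a :: pvScan a cells).getD k 0 = a + ((cells.take k).countP (· = 'X') : Int) := by
  induction cells with
  | nil =>
    intro a k hk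
    simp only [List.length_nil, Nat.le_zero] at hk
    subst hk
    simp
  | cons c cs ih =>
    intro a k hk
    cases k with
    | zero => simp
    | succ k =>
      simp only [List.length_cons] at hk
      have := ih (a + pvXv c) k (by omega)
      simp only [pvScan, List.getD_cons_succ, List.take_succ_cons, List.countP_cons] at this ⊢
      rw [this]
      by_cases hc : c = 'X' <;> simp [pvXv, hc] <;> ring

-- the prefix difference is zero iff the inclusive segment holds no 'X'
theorem pvSegIffPrefix (cells : List Char) (lo hi : Int)
    (h0 : 0 ≤ lo) (hlh : lo ≤ hi) (hhi : hi < (cells.length : Int)) :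
    (PySem.List.pyGetD (pvPrefix cells) (hi + 1) 0 = PySem.List.pyGetD (pvPrefix cells) lo 0) ↔
      (∀ r : Int, lo ≤ r → r ≤ hi → PySem.List.pyGetD cells r '?' ≠ 'X') := by
  have hhlen : hi.toNat + 1 ≤ cells.length := by omega
  have hllen : lo.toNat ≤ cells.length := by omega
  rw [pvPrefix_eq]
  have e1 : PySem.List.pyGetD (0 :: pvScan 0 cells) (hi + 1) 0 =
      (((cells.take (hi.toNat + 1)).countP (· = 'X') : Nat) : Int) := by
    rw [PySem.List.pyGetD_of_nonneg _ _ (by omega : (0:Int) ≤ hi + 1)]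
    have hk : (hi + 1).toNat = hi.toNat + 1 := by omega
    rw [hk, pvScan_getD cells 0 _ hhlen, zero_add]
  have e2 : PySem.List.pyGetD (0 :: pvScan 0 cells) lo 0 =
      (((cells.take lo.toNat).countP (· = 'X') : Nat) : Int) := by
    rw [PySem.List.pyGetD_of_nonneg _ _ h0]
    rw [pvScan_getD cells 0 _ hllen, zero_add]
  rw [e1, e2, Nat.cast_inj]
  have hsplit : cells.take (hi.toNat + 1) =
      cells.take lo.toNat ++ (cells.drop lo.toNat).take (hi.toNat + 1 - lo.toNat) := by
    rw [← List.take_add]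
    congr 1
    omega
  rw [hsplit, List.countP_append, Nat.add_eq_left, List.countP_eq_zero]
  constructor
  · intro hmem r hr1 hr2
    have h0r : 0 ≤ r := le_trans h0 hr1
    rw [PySem.List.pyGetD_eq_getElem _ _ h0r (by omega)]
    intro hX
    have hb : r.toNat - lo.toNat < (hi.toNat + 1 - lo.toNat) ⊓ (cells.length - lo.toNat) := by
      omega
    have hmem' : cells[r.toNat] ∈ (cells.drop lo.toNat).take (hi.toNat + 1 - lo.toNat) := by
      refine List.mem_iff_getElem.mpr ⟨r.toNat - lo.toNat, by simpa using hb, ?_⟩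
      rw [List.getElem_take, List.getElem_drop]
      congr 1
      omega
    have := hmem _ hmem'
    simp [hX] at this
  · intro hseg x hx
    obtain ⟨k, hk, hEq⟩ := List.mem_iff_getElem.mp hx
    rw [List.getElem_take, List.getElem_drop] at hEq
    simp only [List.length_take, List.length_drop, lt_inf_iff] at hk
    have := hseg ((lo.toNat + k : Nat) : Int) (by omega) (by omega)
    rw [PySem.List.pyGetD_eq_getElem _ _ (by omega) (by push_cast; omega)] at this
    simp only [Int.toNat_natCast] at this
    rw [← hEq]
    simpa using this

-- A's collision scan for one line (current coordinate cur, target tgt), as a segment condition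
theorem pvScanIffSeg (c : Int → Char) (cur tgt : Int) (h0 : c cur ≠ 'X') :
    ((∀ r ∈ (if tgt < cur then PySem.List.pyRange tgt cur else PySem.List.pyRange cur (tgt + 1)),
        c r ≠ 'X') ∧ c tgt ≠ 'X') ↔
      (∀ r : Int, min cur tgt ≤ r → r ≤ max cur tgt → c r ≠ 'X') := by
  by_cases h : tgt < cur
  · rw [if_pos h, min_eq_right (le_of_lt h), max_eq_left (le_of_lt h)]
    simp only [PySem.List.mem_pyRange_one]
    constructor
    · rintro ⟨hs, _⟩ r hr1 hr2
      by_cases hrc : r = cur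
      · subst hrc; exact h0
      · exact hs r ⟨hr1, by omega⟩
    · intro hseg
      exact ⟨fun r hr => hseg r hr.1 (by omega), hseg tgt le_rfl (by omega)⟩
  · push Not at h
    rw [if_neg (not_lt.mpr h), min_eq_left h, max_eq_right h]
    simp only [PySem.List.mem_pyRange_one]
    constructor
    · rintro ⟨hs, _⟩ r hr1 hr2
      exact hs r ⟨hr1, by omega⟩
    · intro hseg
      exact ⟨fun r hr => hseg r hr.1 (by omega), hseg tgt h le_rfl⟩

-- rowpre looked up at a valid row index is that row's prefix table
theorem pvRowpreAt (park : List String) (i : Int) (h0 : 0 ≤ i) (hi : i < (park.length : Int)) :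
    PySem.List.pyGetD (park.map (fun row => pvPrefix row.toList)) i [] =
      pvPrefix (PySem.List.pyGetD park i "").toList := by
  rw [PySem.List.pyGetD_eq_getElem _ _ h0 (by simpa using hi), List.getElem_map,
    PySem.List.pyGetD_eq_getElem park _ h0 hi]

-- rowpre looked up at row i compared at (lo, hi+1) decides exactly "row segment clear"
theorem pvClearRow (park : List String) (cols : Int)
    (hrect : ∀ row ∈ park, ((row.toList.length : Int)) = cols)
    (i lo hi : Int) (h0i : 0 ≤ i) (hiR : i < (park.length : Int))
    (h0lo : 0 ≤ lo) (hlh : lo ≤ hi) (hhic : hi < cols) :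
    (PySem.List.pyGetD (PySem.List.pyGetD (park.map (fun row => pvPrefix row.toList)) i []) (hi + 1) 0 =
      PySem.List.pyGetD (PySem.List.pyGetD (park.map (fun row => pvPrefix row.toList)) i []) lo 0) ↔
    (∀ r : Int, lo ≤ r → r ≤ hi → pvCell park i r ≠ 'X') := by
  rw [pvRowpreAt park i h0i hiR]
  have hlen : (((PySem.List.pyGetD park i "").toList.length : Int)) = cols := by
    rw [PySem.List.pyGetD_eq_getElem park _ h0i hiR]
    exact hrect _ (List.getElem_mem _)
  exact pvSegIffPrefix _ lo hi h0lo hlh (by omega)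

-- colpre looked up at column j compared at (lo, hi+1) decides exactly "column segment clear"
-- (uses that on a rectangular park zip(*park) yields the full columns)
theorem pvCols_rect : ∀ (c : Nat) (rows : List (List Char)), rows ≠ [] →
    (∀ r ∈ rows, r.length = c) →
    pvCols rows = (List.range c).map (fun k => rows.map (fun r => r.getD k ' ')) := by
  intro c
  induction c with
  | zero =>
    intro rows hne hlen
    rw [pvCols.eq_def]
    rw [dif_neg (by
      rintro ⟨-, hall⟩
      obtain ⟨r0, hr0⟩ := List.exists_mem_of_ne_nil rows hne
      exact hall r0 hr0 (List.eq_nil_of_length_eq_zero (hlen r0 hr0)))]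
    simp
  | succ c ih =>
    intro rows hne hlen
    rw [pvCols.eq_def]
    rw [dif_pos ⟨hne, fun r hr => by
      intro hnil
      have := hlen r hr
      rw [hnil] at this
      simp at this⟩]
    have htails : pvCols (rows.map List.tail) =
        (List.range c).map (fun k => (rows.map List.tail).map (fun r => r.getD k ' ')) := by
      apply ih
      · simpa using hne
      · intro r hr
        obtain ⟨r', hr', rfl⟩ := List.mem_map.mp hr
        have := hlen r' hr'
        simp [this]
    rw [htails]
    rw [show List.range (c+1) = 0 :: (List.range c).map (·+1) from by
      rw [List.range_eq_range', List.range'_succ, List.range_eq_range']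
      congr 1
      have h : List.range' 1 c = List.map (fun x => 1 + x) (List.range c) :=
        List.range'_eq_map_range
      simpa [Nat.add_comm, List.range_eq_range'] using h]
    simp only [List.map_cons, List.map_map]
    congr 1
    · apply List.map_congr_left
      intro r _
      cases r <;> rfl
    · apply List.map_congr_left
      intro k _
      simp only [Function.comp]
      apply List.map_congr_left
      intro r _
      cases r <;> rfl

theorem pvClearCol (park : List String) (cols : Int)
    (hrect : ∀ row ∈ park, ((row.toList.length : Int)) = cols)
    (j lo hi : Int) (h0j : 0 ≤ j) (hjC : j < cols)
    (h0lo : 0 ≤ lo) (hlh : lo ≤ hi) (hhiR : hi < (park.length : Int)) :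
    (PySem.List.pyGetD (PySem.List.pyGetD
        (List.map pvPrefix (pvCols (List.map (fun row => row.toList) park))) j []) (hi + 1) 0 =
      PySem.List.pyGetD (PySem.List.pyGetD
        (List.map pvPrefix (pvCols (List.map (fun row => row.toList) park))) j []) lo 0) ↔
    (∀ r : Int, lo ≤ r → r ≤ hi → pvCell park r j ≠ 'X') := by
  have hne : park ≠ [] := by
    rintro rfl
    simp at hhiR
    omega
  have hrect' : ∀ r ∈ List.map (fun row => row.toList) park, r.length = cols.toNat := by
    intro r hr
    obtain ⟨row, hrow, rfl⟩ := List.mem_map.mp hr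
    have := hrect row hrow
    omega
  rw [pvCols_rect cols.toNat _ (by simpa using hne) hrect', List.map_map]
  have hjlt : j.toNat < cols.toNat := by omega
  rw [PySem.List.pyGetD_eq_getElem _ _ h0j (by simpa using (by omega : j < (cols.toNat : Int))),
    List.getElem_map, List.getElem_range]
  simp only [List.map_map, Function.comp_def]
  rw [pvSegIffPrefix _ lo hi h0lo hlh (by simpa using hhiR)]
  apply forall_congr'
  intro r
  by_cases hr1 : lo ≤ r
  · by_cases hr2 : r ≤ hi
    · have hcell : PySem.List.pyGetD
          (List.map (fun row => row.toList.getD j.toNat ' ') park) r '?' = pvCell park r j := by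
        rw [PySem.List.pyGetD_eq_getElem _ _ (by omega) (by simpa using (by omega : r < (park.length : Int))),
          List.getElem_map]
        unfold pvCell
        rw [PySem.List.pyGetD_eq_getElem park _ (by omega) (by omega)]
        have hjlen : j.toNat < park[r.toNat].toList.length := by
          have := hrect park[r.toNat] (List.getElem_mem _)
          omega
        rw [PySem.List.pyGetD_eq_getElem _ _ h0j (by omega),
          List.getD_eq_getElem _ _ hjlen]
      rw [hcell]
    · simp [hr2]
  · simp [hr1]

theorem pvFoldOr (p : Int → Prop) [DecidablePred p] (l : List Int) (b : Bool) :
    l.foldl (fun acc x => decide (p x) || acc) b = (b || l.any fun x => decide (p x)) := by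
  induction l generalizing b with
  | nil => simp
  | cons x xs ih =>
    simp only [List.foldl_cons, List.any_cons, ih]
    by_cases h : p x <;> simp [h, Bool.or_comm]

-- A's collision condition for a northward move, as the negated segment condition
theorem pvVertInN (park : List String) (i j n : Int) (hX : pvCell park i j ≠ 'X') :
    (pvCell park (i - n) j = 'X' ∨
      List.foldl (fun b r => decide (pvCell park r j = 'X') || b) false
        (if 0 < n then PySem.List.pyRange (i - n) i else PySem.List.pyRange i (i - n + 1)) = true) ↔
    ¬ (∀ r : Int, min i (i - n) ≤ r → r ≤ max i (i - n) → pvCell park r j ≠ 'X') := by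
  have hR : (if 0 < n then PySem.List.pyRange (i - n) i else PySem.List.pyRange i (i - n + 1)) =
      (if (i - n) < i then PySem.List.pyRange (i - n) i else PySem.List.pyRange i ((i - n) + 1)) := by
    by_cases h : 0 < n
    · rw [if_pos h, if_pos (by omega)]
    · rw [if_neg h, if_neg (by omega)]
  rw [pvFoldOr (fun r => pvCell park r j = 'X'), hR,
    ← pvScanIffSeg (fun r => pvCell park r j) i (i - n) hX]
  simp only [Bool.false_or, List.any_eq_true, decide_eq_true_eq]
  push Not
  constructor
  · rintro (h | ⟨x, hx, hXx⟩) hall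
    · exact h
    · exact absurd hXx (hall x hx)
  · intro h
    by_cases hall : ∀ r ∈ (if i - n < i then PySem.List.pyRange (i - n) i
        else PySem.List.pyRange i (i - n + 1)), pvCell park r j ≠ 'X'
    · exact Or.inl (h hall)
    · push Not at hall
      obtain ⟨x, hx, hXx⟩ := hall
      exact Or.inr ⟨x, hx, hXx⟩

-- A's collision condition for a southward move, as the negated segment condition
theorem pvVertInS (park : List String) (i j n : Int) (hX : pvCell park i j ≠ 'X') :
    (pvCell park (i + n) j = 'X' ∨
      List.foldl (fun b r => decide (pvCell park r j = 'X') || b) false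
        (if n < 0 then PySem.List.pyRange (i + n) i else PySem.List.pyRange i (i + n + 1)) = true) ↔
    ¬ (∀ r : Int, min i (i + n) ≤ r → r ≤ max i (i + n) → pvCell park r j ≠ 'X') := by
  have hR : (if n < 0 then PySem.List.pyRange (i + n) i else PySem.List.pyRange i (i + n + 1)) =
      (if (i + n) < i then PySem.List.pyRange (i + n) i else PySem.List.pyRange i ((i + n) + 1)) := by
    by_cases h : n < 0
    · rw [if_pos h, if_pos (by omega)]
    · rw [if_neg h, if_neg (by omega)]
  rw [pvFoldOr (fun r => pvCell park r j = 'X'), hR,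
    ← pvScanIffSeg (fun r => pvCell park r j) i (i + n) hX]
  simp only [Bool.false_or, List.any_eq_true, decide_eq_true_eq]
  push Not
  constructor
  · rintro (h | ⟨x, hx, hXx⟩) hall
    · exact h
    · exact absurd hXx (hall x hx)
  · intro h
    by_cases hall : ∀ r ∈ (if i + n < i then PySem.List.pyRange (i + n) i
        else PySem.List.pyRange i (i + n + 1)), pvCell park r j ≠ 'X'
    · exact Or.inl (h hall)
    · push Not at hall
      obtain ⟨x, hx, hXx⟩ := hall
      exact Or.inr ⟨x, hx, hXx⟩

-- A's collision condition for a westward/eastward move, as the negated segment condition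
theorem pvHorizIn (park : List String) (i j tgt : Int) (R : List Int)
    (hR : R = if tgt < j then PySem.List.pyRange tgt j else PySem.List.pyRange j (tgt + 1))
    (hX : pvCell park i j ≠ 'X') :
    (List.foldl (fun b r => decide (pvCell park i r = 'X') || b)
        (decide (pvCell park i tgt = 'X')) R = true) ↔
    ¬ (∀ r : Int, min j tgt ≤ r → r ≤ max j tgt → pvCell park i r ≠ 'X') := by
  rw [pvFoldOr (fun r => pvCell park i r = 'X'), hR,
    ← pvScanIffSeg (fun r => pvCell park i r) j tgt hX]
  simp only [Bool.or_eq_true, List.any_eq_true, decide_eq_true_eq]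
  push Not
  constructor
  · rintro (h | ⟨x, hx, hXx⟩) hall
    · exact h
    · exact absurd hXx (hall x hx)
  · intro h
    by_cases hall : ∀ r ∈ (if tgt < j then PySem.List.pyRange tgt j
        else PySem.List.pyRange j (tgt + 1)), pvCell park i r ≠ 'X'
    · exact Or.inl (h hall)
    · push Not at hall
      obtain ⟨x, hx, hXx⟩ := hall
      exact Or.inr ⟨x, hx, hXx⟩

-- the route-loop invariant: the dog is in bounds and never stands on an 'X'
def pvInv (park : List String) (cols : Int) (p : Int × Int) : Prop :=
  0 ≤ p.1 ∧ p.1 < (park.length : Int) ∧ 0 ≤ p.2 ∧ p.2 < cols ∧ pvCell park p.1 p.2 ≠ 'X'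

theorem pvStepN (park : List String) (cols : Int)
    (hrect : ∀ row ∈ park, ((row.toList.length : Int)) = cols)
    (route m : String) (n i j : Int)
    (hsp : PySem.Str.split? route " " = some ["N", m])
    (hmm : PySem.Int.ofStr? m = some n)
    (h0i : 0 ≤ i) (hiR : i < (park.length : Int))
    (h0j : 0 ≤ j) (hjC : j < cols) (hX : pvCell park i j ≠ 'X') :
    stepA park [(park.length : Int) - 1, cols - 1] [i, j] route =
      [(stepB (park.map (fun row => pvPrefix row.toList))
          ((pvCols (park.map (fun row => row.toList))).map pvPrefix)
          (park.length : Int) cols (i, j) route).1,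
        (stepB (park.map (fun row => pvPrefix row.toList))
          ((pvCols (park.map (fun row => row.toList))).map pvPrefix)
          (park.length : Int) cols (i, j) route).2] ∧
      pvInv park cols
        (stepB (park.map (fun row => pvPrefix row.toList))
          ((pvCols (park.map (fun row => row.toList))).map pvPrefix)
          (park.length : Int) cols (i, j) route) := by
  simp only [pvInv]
  unfold stepA stepB
  simp only [hsp, hmm, Option.getD_some]
  rw [show (if ("N":String) = "S" then (1:Int) else 0) = 0 from by decide,
      show (if ("N":String) = "E" then (1:Int) else 0) = 0 from by decide,
      show (if ("N":String) = "W" then (1:Int) else 0) = 0 from by decide]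
  norm_num [PySem.List.pyGetD_zero_cons, PySem.List.pyGetD_ofNat']
  simp only [show i + -n = i - n from by ring]
  by_cases hbv : 0 ≤ i - n ∧ i - n < (park.length : Int)
  · -- target row in bounds: both commit iff the column segment is clear
    have hA1 : ¬(i < n ∨ j < 0) := by omega
    have hB1 : n ≤ i ∧ i < (park.length : Int) + n ∧ 0 ≤ j ∧ j < cols := by omega
    have hA2 : ¬((park.length : Int) ≤ i - n ∨ cols ≤ j) := by omega
    simp only [if_neg hA1, if_neg hA2, if_pos hB1]
    by_cases hn0 : n = 0
    · -- zero move: both tests see only the current cell, which is not 'X'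
      subst hn0
      norm_num
      exact ⟨h0i, hiR, h0j, hjC, hX⟩
    · -- real move: A's scan and B's prefix difference decide the same segment
      have hAiff := pvVertInN park i j n hX
      have hBiff : (PySem.List.pyGetD (PySem.List.pyGetD
            (List.map pvPrefix (pvCols (List.map (fun row => row.toList) park))) j [])
            ((if n ≤ 0 then (i, i - n) else (i - n, i)).2 + 1) 0 =
          PySem.List.pyGetD (PySem.List.pyGetD
            (List.map pvPrefix (pvCols (List.map (fun row => row.toList) park))) j [])
            (if n ≤ 0 then (i, i - n) else (i - n, i)).1 0) ↔
          (∀ r : Int, min i (i - n) ≤ r → r ≤ max i (i - n) → pvCell park r j ≠ 'X') := by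
        by_cases hn : n ≤ 0
        · simp only [if_pos hn]
          rw [min_eq_left (by omega), max_eq_right (by omega)]
          exact pvClearCol park cols hrect j i (i - n) h0j hjC h0i (by omega) (by omega)
        · simp only [if_neg hn]
          rw [min_eq_right (by omega), max_eq_left (by omega)]
          exact pvClearCol park cols hrect j (i - n) i h0j hjC (by omega) (by omega) (by omega)
      by_cases hsc : ∀ r : Int, min i (i - n) ≤ r → r ≤ max i (i - n) → pvCell park r j ≠ 'X'
      · simp only [if_neg (show ¬_ from fun h => (hAiff.mp h) hsc), if_neg hn0,
          if_pos (hBiff.mpr hsc)]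
        exact ⟨trivial, hbv.1, hbv.2, h0j, hjC,
          hsc (i - n) (by omega) (by omega)⟩
      · simp only [if_pos (hAiff.mpr hsc), if_neg hn0, if_neg (fun h => hsc (hBiff.mp h))]
        exact ⟨trivial, h0i, hiR, h0j, hjC, hX⟩
  · -- target row out of bounds: both keep the dog
    have hB1 : ¬(n ≤ i ∧ i < (park.length : Int) + n ∧ 0 ≤ j ∧ j < cols) := by omega
    simp only [if_neg hB1]
    refine ⟨?_, h0i, hiR, h0j, hjC, hX⟩
    by_cases hA1 : i < n ∨ j < 0
    · rw [if_pos hA1]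
    · rw [if_neg hA1, if_pos (show (park.length : Int) ≤ i - n ∨ cols ≤ j from by omega)]

theorem pvStepS (park : List String) (cols : Int)
    (hrect : ∀ row ∈ park, ((row.toList.length : Int)) = cols)
    (route m : String) (n i j : Int)
    (hsp : PySem.Str.split? route " " = some ["S", m])
    (hmm : PySem.Int.ofStr? m = some n)
    (h0i : 0 ≤ i) (hiR : i < (park.length : Int))
    (h0j : 0 ≤ j) (hjC : j < cols) (hX : pvCell park i j ≠ 'X') :
    stepA park [(park.length : Int) - 1, cols - 1] [i, j] route =
      [(stepB (park.map (fun row => pvPrefix row.toList))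
          ((pvCols (park.map (fun row => row.toList))).map pvPrefix)
          (park.length : Int) cols (i, j) route).1,
        (stepB (park.map (fun row => pvPrefix row.toList))
          ((pvCols (park.map (fun row => row.toList))).map pvPrefix)
          (park.length : Int) cols (i, j) route).2] ∧
      pvInv park cols
        (stepB (park.map (fun row => pvPrefix row.toList))
          ((pvCols (park.map (fun row => row.toList))).map pvPrefix)
          (park.length : Int) cols (i, j) route) := by
  simp only [pvInv]
  unfold stepA stepB
  simp only [hsp, hmm, Option.getD_some, if_neg (show ¬("S":String) = "N" from by decide),
    if_neg (show ¬("S":String) = "E" from by decide), if_neg (show ¬("S":String) = "W" from by decide)]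
  norm_num [PySem.List.pyGetD_zero_cons, PySem.List.pyGetD_ofNat']
  by_cases hbv : 0 ≤ i + n ∧ i + n < (park.length : Int)
  · have hA1 : ¬(i + n < 0 ∨ j < 0) := by omega
    have hB1 : 0 ≤ i + n ∧ i + n < (park.length : Int) ∧ 0 ≤ j ∧ j < cols := by omega
    have hA2 : ¬((park.length : Int) ≤ i + n ∨ cols ≤ j) := by omega
    simp only [if_neg hA1, if_neg hA2, if_pos hB1]
    by_cases hn0 : n = 0
    · subst hn0
      norm_num
      exact ⟨h0i, hiR, h0j, hjC, hX⟩
    · have hAiff := pvVertInS park i j n hX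
      have hBiff : (PySem.List.pyGetD (PySem.List.pyGetD
            (List.map pvPrefix (pvCols (List.map (fun row => row.toList) park))) j [])
            ((if 0 ≤ n then (i, i + n) else (i + n, i)).2 + 1) 0 =
          PySem.List.pyGetD (PySem.List.pyGetD
            (List.map pvPrefix (pvCols (List.map (fun row => row.toList) park))) j [])
            (if 0 ≤ n then (i, i + n) else (i + n, i)).1 0) ↔
          (∀ r : Int, min i (i + n) ≤ r → r ≤ max i (i + n) → pvCell park r j ≠ 'X') := by
        by_cases hn : 0 ≤ n
        · simp only [if_pos hn]
          rw [min_eq_left (by omega), max_eq_right (by omega)]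
          exact pvClearCol park cols hrect j i (i + n) h0j hjC h0i (by omega) (by omega)
        · simp only [if_neg hn]
          rw [min_eq_right (by omega), max_eq_left (by omega)]
          exact pvClearCol park cols hrect j (i + n) i h0j hjC (by omega) (by omega) (by omega)
      by_cases hsc : ∀ r : Int, min i (i + n) ≤ r → r ≤ max i (i + n) → pvCell park r j ≠ 'X'
      · simp only [if_neg (show ¬_ from fun h => (hAiff.mp h) hsc), if_neg hn0,
          if_pos (hBiff.mpr hsc)]
        exact ⟨trivial, hbv.1, hbv.2, h0j, hjC,
          hsc (i + n) (by omega) (by omega)⟩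
      · simp only [if_pos (hAiff.mpr hsc), if_neg hn0, if_neg (fun h => hsc (hBiff.mp h))]
        exact ⟨trivial, h0i, hiR, h0j, hjC, hX⟩
  · have hB1 : ¬(0 ≤ i + n ∧ i + n < (park.length : Int) ∧ 0 ≤ j ∧ j < cols) := by omega
    simp only [if_neg hB1]
    refine ⟨?_, h0i, hiR, h0j, hjC, hX⟩
    by_cases hA1 : i + n < 0 ∨ j < 0
    · rw [if_pos hA1]
    · rw [if_neg hA1, if_pos (show (park.length : Int) ≤ i + n ∨ cols ≤ j from by omega)]

theorem pvStepW (park : List String) (cols : Int)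
    (hrect : ∀ row ∈ park, ((row.toList.length : Int)) = cols)
    (route m : String) (n i j : Int)
    (hsp : PySem.Str.split? route " " = some ["W", m])
    (hmm : PySem.Int.ofStr? m = some n)
    (h0i : 0 ≤ i) (hiR : i < (park.length : Int))
    (h0j : 0 ≤ j) (hjC : j < cols) (hX : pvCell park i j ≠ 'X') :
    stepA park [(park.length : Int) - 1, cols - 1] [i, j] route =
      [(stepB (park.map (fun row => pvPrefix row.toList))
          ((pvCols (park.map (fun row => row.toList))).map pvPrefix)
          (park.length : Int) cols (i, j) route).1,
        (stepB (park.map (fun row => pvPrefix row.toList))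
          ((pvCols (park.map (fun row => row.toList))).map pvPrefix)
          (park.length : Int) cols (i, j) route).2] ∧
      pvInv park cols
        (stepB (park.map (fun row => pvPrefix row.toList))
          ((pvCols (park.map (fun row => row.toList))).map pvPrefix)
          (park.length : Int) cols (i, j) route) := by
  simp only [pvInv]
  unfold stepA stepB
  simp only [hsp, hmm, Option.getD_some, if_neg (show ¬("W":String) = "N" from by decide), if_neg (show ¬("W":String) = "S" from by decide), if_neg (show ¬("W":String) = "E" from by decide)]
  norm_num [PySem.List.pyGetD_zero_cons, PySem.List.pyGetD_ofNat']
  simp only [show j + -n = j - n from by ring]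
  by_cases hbv : 0 ≤ j - n ∧ j - n < cols
  · have hA1 : ¬(i < 0 ∨ j < n) := by omega
    have hB1 : 0 ≤ i ∧ i < (park.length : Int) ∧ n ≤ j ∧ j < cols + n := by omega
    have hA2 : ¬((park.length : Int) ≤ i ∨ cols ≤ j - n) := by omega
    simp only [if_neg hA1, if_neg hA2, if_pos hB1]
    have hAiff := pvHorizIn park i j (j - n)
      (if 0 < n then PySem.List.pyRange (j - n) j else PySem.List.pyRange j (j - n + 1))
      (by
        by_cases h : 0 < n
        · rw [if_pos h, if_pos (by omega)]
        · rw [if_neg h, if_neg (by omega)]) hX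
    have hBiff : (PySem.List.pyGetD (PySem.List.pyGetD
          (List.map (fun row => pvPrefix row.toList) park) i [])
          ((if n ≤ 0 then (j, j - n) else (j - n, j)).2 + 1) 0 =
        PySem.List.pyGetD (PySem.List.pyGetD
          (List.map (fun row => pvPrefix row.toList) park) i [])
          (if n ≤ 0 then (j, j - n) else (j - n, j)).1 0) ↔
        (∀ r : Int, min j (j - n) ≤ r → r ≤ max j (j - n) → pvCell park i r ≠ 'X') := by
      by_cases hn : n ≤ 0
      · simp only [if_pos hn]
        rw [min_eq_left (by omega), max_eq_right (by omega)]
        exact pvClearRow park cols hrect i j (j - n) h0i hiR h0j (by omega) (by omega)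
      · simp only [if_neg hn]
        rw [min_eq_right (by omega), max_eq_left (by omega)]
        exact pvClearRow park cols hrect i (j - n) j h0i hiR (by omega) (by omega) (by omega)
    by_cases hsc : ∀ r : Int, min j (j - n) ≤ r → r ≤ max j (j - n) → pvCell park i r ≠ 'X'
    · simp only [if_neg (show ¬_ from fun h => (hAiff.mp h) hsc), if_pos (hBiff.mpr hsc)]
      exact ⟨trivial, h0i, hiR, hbv.1, hbv.2,
        hsc (j - n) (by omega) (by omega)⟩
    · simp only [if_pos (hAiff.mpr hsc), if_neg (fun h => hsc (hBiff.mp h))]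
      exact ⟨trivial, h0i, hiR, h0j, hjC, hX⟩
  · have hB1 : ¬(0 ≤ i ∧ i < (park.length : Int) ∧ n ≤ j ∧ j < cols + n) := by omega
    simp only [if_neg hB1]
    refine ⟨?_, h0i, hiR, h0j, hjC, hX⟩
    by_cases hA1 : i < 0 ∨ j < n
    · rw [if_pos hA1]
    · rw [if_neg hA1, if_pos (show (park.length : Int) ≤ i ∨ cols ≤ j - n from by omega)]

theorem pvStepE (park : List String) (cols : Int)
    (hrect : ∀ row ∈ park, ((row.toList.length : Int)) = cols)
    (route m : String) (n i j : Int)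
    (hsp : PySem.Str.split? route " " = some ["E", m])
    (hmm : PySem.Int.ofStr? m = some n)
    (h0i : 0 ≤ i) (hiR : i < (park.length : Int))
    (h0j : 0 ≤ j) (hjC : j < cols) (hX : pvCell park i j ≠ 'X') :
    stepA park [(park.length : Int) - 1, cols - 1] [i, j] route =
      [(stepB (park.map (fun row => pvPrefix row.toList))
          ((pvCols (park.map (fun row => row.toList))).map pvPrefix)
          (park.length : Int) cols (i, j) route).1,
        (stepB (park.map (fun row => pvPrefix row.toList))
          ((pvCols (park.map (fun row => row.toList))).map pvPrefix)
          (park.length : Int) cols (i, j) route).2] ∧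
      pvInv park cols
        (stepB (park.map (fun row => pvPrefix row.toList))
          ((pvCols (park.map (fun row => row.toList))).map pvPrefix)
          (park.length : Int) cols (i, j) route) := by
  simp only [pvInv]
  unfold stepA stepB
  simp only [hsp, hmm, Option.getD_some, if_neg (show ¬("E":String) = "N" from by decide), if_neg (show ¬("E":String) = "S" from by decide), if_neg (show ¬("E":String) = "W" from by decide)]
  norm_num [PySem.List.pyGetD_zero_cons, PySem.List.pyGetD_ofNat']
  by_cases hbv : 0 ≤ j + n ∧ j + n < cols
  · have hA1 : ¬(i < 0 ∨ j + n < 0) := by omega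
    have hB1 : 0 ≤ i ∧ i < (park.length : Int) ∧ 0 ≤ j + n ∧ j + n < cols := by omega
    have hA2 : ¬((park.length : Int) ≤ i ∨ cols ≤ j + n) := by omega
    simp only [if_neg hA1, if_neg hA2, if_pos hB1]
    have hAiff := pvHorizIn park i j (j + n)
      (if n < 0 then PySem.List.pyRange (j + n) j else PySem.List.pyRange j (j + n + 1))
      (by
        by_cases h : n < 0
        · rw [if_pos h, if_pos (by omega)]
        · rw [if_neg h, if_neg (by omega)]) hX
    have hBiff : (PySem.List.pyGetD (PySem.List.pyGetD
          (List.map (fun row => pvPrefix row.toList) park) i [])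
          ((if 0 ≤ n then (j, j + n) else (j + n, j)).2 + 1) 0 =
        PySem.List.pyGetD (PySem.List.pyGetD
          (List.map (fun row => pvPrefix row.toList) park) i [])
          (if 0 ≤ n then (j, j + n) else (j + n, j)).1 0) ↔
        (∀ r : Int, min j (j + n) ≤ r → r ≤ max j (j + n) → pvCell park i r ≠ 'X') := by
      by_cases hn : 0 ≤ n
      · simp only [if_pos hn]
        rw [min_eq_left (by omega), max_eq_right (by omega)]
        exact pvClearRow park cols hrect i j (j + n) h0i hiR h0j (by omega) (by omega)
      · simp only [if_neg hn]
        rw [min_eq_right (by omega), max_eq_left (by omega)]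
        exact pvClearRow park cols hrect i (j + n) j h0i hiR (by omega) (by omega) (by omega)
    by_cases hsc : ∀ r : Int, min j (j + n) ≤ r → r ≤ max j (j + n) → pvCell park i r ≠ 'X'
    · simp only [if_neg (show ¬_ from fun h => (hAiff.mp h) hsc), if_pos (hBiff.mpr hsc)]
      exact ⟨trivial, h0i, hiR, hbv.1, hbv.2,
        hsc (j + n) (by omega) (by omega)⟩
    · simp only [if_pos (hAiff.mpr hsc), if_neg (fun h => hsc (hBiff.mp h))]
      exact ⟨trivial, h0i, hiR, h0j, hjC, hX⟩
  · have hB1 : ¬(0 ≤ i ∧ i < (park.length : Int) ∧ 0 ≤ j + n ∧ j + n < cols) := by omega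
    simp only [if_neg hB1]
    refine ⟨?_, h0i, hiR, h0j, hjC, hX⟩
    by_cases hA1 : i < 0 ∨ j + n < 0
    · rw [if_pos hA1]
    · rw [if_neg hA1, if_pos (show (park.length : Int) ≤ i ∨ cols ≤ j + n from by omega)]

-- one route: A's step agrees with B's step and preserves the invariant
theorem pvStepAgree (park : List String) (cols : Int)
    (hrect : ∀ row ∈ park, ((row.toList.length : Int)) = cols)
    (route : String) (hwf : pvWfRoute route = true) (i j : Int)
    (h0i : 0 ≤ i) (hiR : i < (park.length : Int))
    (h0j : 0 ≤ j) (hjC : j < cols) (hX : pvCell park i j ≠ 'X') :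
    stepA park [(park.length : Int) - 1, cols - 1] [i, j] route =
      [(stepB (park.map (fun row => pvPrefix row.toList))
          ((pvCols (park.map (fun row => row.toList))).map pvPrefix)
          (park.length : Int) cols (i, j) route).1,
        (stepB (park.map (fun row => pvPrefix row.toList))
          ((pvCols (park.map (fun row => row.toList))).map pvPrefix)
          (park.length : Int) cols (i, j) route).2] ∧
      pvInv park cols
        (stepB (park.map (fun row => pvPrefix row.toList))
          ((pvCols (park.map (fun row => row.toList))).map pvPrefix)
          (park.length : Int) cols (i, j) route) := by
  unfold pvWfRoute at hwf
  cases hsp : PySem.Str.split? route " " with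
  | none => rw [hsp] at hwf; exact absurd hwf (by simp)
  | some l =>
    rw [hsp] at hwf
    rcases l with _ | ⟨d, _ | ⟨m, _ | ⟨x, l4⟩⟩⟩
    · exact absurd hwf (by simp)
    · exact absurd hwf (by simp)
    · simp only [Bool.and_eq_true, Bool.or_eq_true, beq_iff_eq] at hwf
      obtain ⟨hd, hm0⟩ := hwf
      cases hmm : PySem.Int.ofStr? m with
      | none => rw [hmm] at hm0; simp at hm0
      | some n =>
        rcases hd with ((hd | hd) | hd) | hd
        · rw [hd] at hsp; exact pvStepN park cols hrect route m n i j hsp hmm h0i hiR h0j hjC hX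
        · rw [hd] at hsp; exact pvStepS park cols hrect route m n i j hsp hmm h0i hiR h0j hjC hX
        · rw [hd] at hsp; exact pvStepW park cols hrect route m n i j hsp hmm h0i hiR h0j hjC hX
        · rw [hd] at hsp; exact pvStepE park cols hrect route m n i j hsp hmm h0i hiR h0j hjC hX
    · exact absurd hwf (by simp)

-- the whole route loop
theorem pvRoutesLoop (park : List String) (cols : Int)
    (hrect : ∀ row ∈ park, ((row.toList.length : Int)) = cols)
    (routes : List String) (hwf : ∀ r ∈ routes, pvWfRoute r = true) :
    ∀ i j : Int, 0 ≤ i → i < (park.length : Int) → 0 ≤ j → j < cols →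
      pvCell park i j ≠ 'X' →
    routes.foldl (stepA park [(park.length : Int) - 1, cols - 1]) [i, j] =
      [(routes.foldl (stepB (park.map (fun row => pvPrefix row.toList))
          ((pvCols (park.map (fun row => row.toList))).map pvPrefix)
          (park.length : Int) cols) (i, j)).1,
        (routes.foldl (stepB (park.map (fun row => pvPrefix row.toList))
          ((pvCols (park.map (fun row => row.toList))).map pvPrefix)
          (park.length : Int) cols) (i, j)).2] ∧
      pvInv park cols
        (routes.foldl (stepB (park.map (fun row => pvPrefix row.toList))
          ((pvCols (park.map (fun row => row.toList))).map pvPrefix)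
          (park.length : Int) cols) (i, j)) := by
  induction routes with
  | nil => intro i j h0i hiR h0j hjC hX; exact ⟨rfl, h0i, hiR, h0j, hjC, hX⟩
  | cons r rs ih =>
    intro i j h0i hiR h0j hjC hX
    have hr := hwf r (by simp)
    have hstep := pvStepAgree park cols hrect r hr i j h0i hiR h0j hjC hX
    obtain ⟨heq, hInv'⟩ := hstep
    obtain ⟨h0i', hiR', h0j', hjC', hX'⟩ := hInv'
    have ih' := ih (fun x hx => hwf x (by simp [hx]))
      _ _ h0i' hiR' h0j' hjC' hX'
    simpa [List.foldl_cons, heq] using ih'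

-- the Option-wrapped route loop of B's port is the plain loop once the start is known
theorem pvFoldOpt (RP CP : List (List Int)) (rows cols : Int)
    (routes : List String) (p : Int × Int) :
    routes.foldl (fun st route => st.map (fun q => stepB RP CP rows cols q route)) (some p) =
      some (routes.foldl (stepB RP CP rows cols) p) := by
  induction routes generalizing p with
  | nil => rfl
  | cons r rs ih => simp only [List.foldl_cons, Option.map_some]; exact ih _

-- ===== VERDICT (by name: the statement is the Claim_ definition above) =====
theorem solution_spec : Claim_equal_solution := by
  intro park routes _hdom hpre
  obtain ⟨hne, hcase⟩ := hpre
  unfold Spec_solution solution solution_alt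
  have hrel := pvStartLoops park
  rcases hcase with hroutes | ⟨hrect0, hS, hwf⟩
  · -- no routes: both return the found start (or [])
    subst hroutes
    rcases hrel with ⟨ha, hb⟩ | ⟨i, j, ha, hb, _, _, _, _⟩
    · simp only [ha, hb, List.foldl_nil]
    · simp only [ha, hb, List.foldl_nil]
  rcases hrel with ⟨ha, hb⟩ | ⟨i, j, ha, hb, hi0, hi1, hfind, hjne⟩
  · exact absurd hb (pvStartLoops_ne_none park hS)
  · have hrect : ∀ row ∈ park, ((row.toList.length : Int)) =
        PySem.Str.len (PySem.List.pyGetD park 0 "") := by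
      intro row hrow
      have := hrect0 row hrow
      rwa [PySem.Str.len_eq] at this
    obtain ⟨hcell, h0j, hjlen⟩ := pvFindS park i j hfind hjne
    have hrowmem : PySem.List.pyGetD park i "" ∈ park := by
      rw [PySem.List.pyGetD_eq_getElem park _ hi0 hi1]
      exact List.getElem_mem _
    have hjC : j < PySem.Str.len (PySem.List.pyGetD park 0 "") := by
      rw [← hrect _ hrowmem]
      exact hjlen
    have hX : pvCell park i j ≠ 'X' := by
      rw [hcell]
      decide
    have hmain := pvRoutesLoop park (PySem.Str.len (PySem.List.pyGetD park 0 "")) hrect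
      routes hwf i j hi0 hi1 h0j hjC hX
    rw [PySem.List.len_eq] at ha
    simp only [ha, hb, pvFoldOpt, PySem.List.len_eq]
    exact hmain.1
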